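-- pv_equiv track=rewrite | github.com/Jan21/BranchingTokens | src/transformations.py | min_prefix
-- ===== SOURCE A (Python) =====
-- from typing import Callable, List, Union
--
-- def _format_vec(vec: List[int]) -> str:
--     """Format vector as [ a b c ] with spaces."""
--     return "[ " + " ".join(str(x) for x in vec) + " ]"
--
-- def min_prefix(vec: List[int], k: int, trace: List[str]) -> List[int]:
--     """Running minimum."""
--     result = []
--     running_min = float('inf')
--     ops = []
--     for x in vec:
--         running_min = min(running_min, x)
--         result.append(running_min)
--         ops.append(f"min = {running_min}")
--     trace.append(f"min_prefix : {' , '.join(ops)} : {_format_vec(result)}")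
--     return result
-- ===== SOURCE B (Python) =====
-- def _format_vec(vec):
--     """Format vector as [ a b c ] with spaces."""
--     return "[ " + " ".join(str(x) for x in vec) + " ]"
--
--
-- def _pref(vec):
--     """Prefix minima by divide and conquer: solve each half independently,
--     then clamp the right half's answers by the left half's total minimum
--     (the last entry of the left answer).  Correct because for i >= mid,
--     min(vec[:i+1]) = min(min(vec[:mid]), min(vec[mid:i+1]))."""
--     if len(vec) <= 1:
--         return list(vec)
--     mid = len(vec) // 2
--     left = _pref(vec[:mid])
--     right = _pref(vec[mid:])
--     m = left[-1]
--     return left + [min(m, r) for r in right]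
--
--
-- def min_prefix(vec, k, trace):
--     """Running minimum (divide-and-conquer), then ops/trace in separate passes."""
--     result = _pref(vec)
--     ops = [f"min = {m}" for m in result]
--     trace.append(f"min_prefix : {' , '.join(ops)} : {_format_vec(result)}")
--     return result
-- ===== Notes on version B (the rewrite author's own statement) =====
-- stated objective: alternative
-- what changed: B computes the prefix minima by divide and conquer -- recursively solve the two halves, then clamp the right half's answers by the left half's total minimum -- instead of A's fused left-to-right loop with a float('inf') running-minimum sentinel; ops strings and the trace line are derived from the finished result in separate passes.
import Mathlib
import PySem

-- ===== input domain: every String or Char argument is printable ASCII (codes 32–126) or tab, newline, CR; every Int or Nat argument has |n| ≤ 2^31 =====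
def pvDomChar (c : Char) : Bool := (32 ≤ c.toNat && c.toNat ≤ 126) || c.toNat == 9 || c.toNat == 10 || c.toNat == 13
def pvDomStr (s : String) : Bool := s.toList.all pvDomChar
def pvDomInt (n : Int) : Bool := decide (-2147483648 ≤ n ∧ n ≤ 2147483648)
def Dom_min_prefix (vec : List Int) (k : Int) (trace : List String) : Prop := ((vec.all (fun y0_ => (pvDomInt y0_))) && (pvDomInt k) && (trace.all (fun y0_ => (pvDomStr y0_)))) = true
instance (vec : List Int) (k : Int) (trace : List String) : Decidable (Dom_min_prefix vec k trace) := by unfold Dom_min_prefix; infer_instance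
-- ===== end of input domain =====

-- B computes the prefix minima by divide and conquer (solve halves, clamp the right half by
-- the left half's total minimum) instead of A's fused forward loop with a float('inf')
-- sentinel; return-value equivalence only: both Pythons also append the (identical) trace
-- line to `trace`, a mutation not modeled here.
-- ===== PORT A =====
-- running_min starts as float('inf'): modeled as Option Int, none = inf (min(inf, x) = x).
def min_prefix (vec : List Int) (k : Int) (trace : List String) : List Int :=
  (vec.foldl
    (fun (s : List Int × Option Int × List String) x =>
      let rm : Int := match s.2.1 with
        | none => x
        | some m => min m x
      (s.1 ++ [rm], some rm, s.2.2 ++ ["min = " ++ PySem.Int.toStr rm]))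
    ([], none, [])).1

-- ===== PORT B =====
-- divide and conquer: solve each half, clamp the right answers by left[-1]
def prefDC (vec : List Int) : List Int :=
  if h : vec.length ≤ 1 then vec
  else
    let mid := vec.length / 2
    let left := prefDC (vec.take mid)
    let right := prefDC (vec.drop mid)
    let m := (PySem.List.pyGet? left (-1)).getD 0
    left ++ right.map (fun r => min m r)
termination_by vec.length
decreasing_by
  · simp only [List.length_take]; omega
  · simp only [List.length_drop]; omega

def min_prefix_alt (vec : List Int) (k : Int) (trace : List String) : List Int :=
  prefDC vec

-- ===== PRECONDITION & SPEC =====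
def Spec_min_prefix (vec : List Int) (k : Int) (trace : List String) (out : List Int) : Prop := out = min_prefix_alt vec k trace
instance (vec : List Int) (k : Int) (trace : List String) (out : List Int) : Decidable (Spec_min_prefix vec k trace out) := by unfold Spec_min_prefix; infer_instance

-- ===== CLAIM (what is proved, stated in full; the proofs are below) =====
def Claim_equal_min_prefix : Prop := ∀ (vec : List Int) (k : Int) (trace : List String), Dom_min_prefix vec k trace → Spec_min_prefix vec k trace (min_prefix vec k trace)

-- ===== LEMMAS AND PROOFS =====

-- the running minima of t, started from running minimum m (shared characterisation)
def scanMin (m : Int) : List Int → List Int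
  | [] => []
  | x :: xs => min m x :: scanMin (min m x) xs

-- the intended result: x :: running minima of the tail started at x
def pm : List Int → List Int
  | [] => []
  | x :: xs => x :: scanMin x xs

-- A's loop, entered with running minimum m, appends the running minima of the rest
theorem minprefix_foldA (t : List Int) : ∀ (acc : List Int) (ops : List String) (m : Int),
    (t.foldl
      (fun (s : List Int × Option Int × List String) x =>
        let rm : Int := match s.2.1 with
          | none => x
          | some m => min m x
        (s.1 ++ [rm], some rm, s.2.2 ++ ["min = " ++ PySem.Int.toStr rm]))
      (acc, some m, ops)).1
    = acc ++ scanMin m t := by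
  induction t with
  | nil => intro acc ops m; simp [scanMin]
  | cons x xs ih =>
    intro acc ops m
    simp only [List.foldl_cons, scanMin, ih, List.append_assoc, List.cons_append,
      List.nil_append]

theorem minprefix_A_eq_pm (vec : List Int) (k : Int) (trace : List String) :
    min_prefix vec k trace = pm vec := by
  unfold min_prefix
  cases vec with
  | nil => simp [pm]
  | cons h t =>
    rw [List.foldl_cons, minprefix_foldA]
    simp [pm]

-- clamping running minima by m shifts the start value
theorem map_min_scanMin (xs : List Int) : ∀ (m x : Int),
    (scanMin x xs).map (fun r => min m r) = scanMin (min m x) xs := by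
  induction xs with
  | nil => intro m x; simp [scanMin]
  | cons y ys ih =>
    intro m x
    simp only [scanMin, List.map_cons, ih, min_assoc]

-- running minima of a concatenation
theorem scanMin_append (L : List Int) : ∀ (m : Int) (R : List Int),
    scanMin m (L ++ R) = scanMin m L ++ scanMin (L.foldl min m) R := by
  induction L with
  | nil => intro m R; simp [scanMin]
  | cons x xs ih =>
    intro m R
    simp only [List.cons_append, scanMin, List.foldl_cons, ih]

-- the last entry of pm is the total minimum
theorem pm_last (xs : List Int) : ∀ (x : Int),
    PySem.List.pyGet? (pm (x :: xs)) (-1) = some (xs.foldl min x) := by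
  induction xs with
  | nil => intro x; simp [pm, scanMin, PySem.List.pyGet?_neg_one]
  | cons y ys ih =>
    intro x
    have := ih (min x y)
    simp only [pm, scanMin, PySem.List.pyGet?_neg_one] at this ⊢
    rw [List.getLast?_cons_cons]
    simpa using this

-- the divide-and-conquer combine step, on pm
theorem pm_combine (x : Int) (xs : List Int) (R : List Int) :
    pm ((x :: xs) ++ R)
      = pm (x :: xs)
        ++ (pm R).map (fun r => min ((PySem.List.pyGet? (pm (x :: xs)) (-1)).getD 0) r) := by
  rw [pm_last]
  cases R with
  | nil => simp [pm]
  | cons y ys =>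
    simp only [pm, List.cons_append, Option.getD_some, List.map_cons, map_min_scanMin]
    rw [scanMin_append]
    simp [scanMin]

theorem prefDC_eq_pm (vec : List Int) : prefDC vec = pm vec := by
  fun_induction prefDC vec with
  | case1 vec h =>
    match vec, h with
    | [], _ => simp [pm]
    | [x], _ => simp [pm, scanMin]
  | case2 vec h mid left right m ihl ihr =>
    simp only [m, left, right, mid] at ihl ihr ⊢
    have hsplit : vec.take (vec.length / 2) ++ vec.drop (vec.length / 2) = vec :=
      List.take_append_drop _ vec
    have hL : vec.take (vec.length / 2) ≠ [] := by
      intro he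
      rcases List.take_eq_nil_iff.mp he with h0 | h0
      · omega
      · subst h0; simp at h
    obtain ⟨x, xs, hx⟩ := List.exists_cons_of_ne_nil hL
    rw [ihl, ihr, hx, ← pm_combine, ← hx, hsplit]

-- ===== VERDICT (by name: the statement is the Claim_ definition above) =====
theorem min_prefix_spec : Claim_equal_min_prefix := by
  intro vec k trace _
  unfold Spec_min_prefix min_prefix_alt
  rw [minprefix_A_eq_pm, prefDC_eq_pm]
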